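-- pv_equiv track=rewrite | github.com/YesSir457/IA-Lab | Data Science/Assignment 1 (apriori)/Assignment1.py | generate_combinaisons
-- ===== SOURCE A (Python) =====
-- def generate_combinaisons(cdc, r):
--   if r == 0:
--     return [[]]
--   if len(cdc) == 0:
--     return []
--   combinaisons = []
--   for i in range(len(cdc)):
--     element = cdc[i]
--     rest = cdc[i + 1:]
--     for comb in generate_combinaisons(rest, r - 1):
--       combinaisons.append([element] + comb)
--   return combinaisons
-- ===== SOURCE B (Python) =====
-- def generate_combinaisons(cdc, r):
--     if r < 0 or r > len(cdc):
--         return []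
--     # table[k] = all size-k combinations (in index order) of the suffix processed so far
--     table = [[[]]] + [[] for _ in range(r)]
--     for x in reversed(cdc):
--         for k in range(r, 0, -1):
--             table[k] = [[x] + c for c in table[k - 1]] + table[k]
--     return table[r]
-- ===== Notes on version B (the rewrite author's own statement) =====
-- stated objective: alternative
-- what changed: Replaces A's top-down recursion over suffix slices (cdc[i+1:] per loop index) by a single right-to-left pass that maintains a DP table of the combinations of every size k <= r of the processed suffix, sharing subproblem results instead of recomputing them per branch.
import Mathlib
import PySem

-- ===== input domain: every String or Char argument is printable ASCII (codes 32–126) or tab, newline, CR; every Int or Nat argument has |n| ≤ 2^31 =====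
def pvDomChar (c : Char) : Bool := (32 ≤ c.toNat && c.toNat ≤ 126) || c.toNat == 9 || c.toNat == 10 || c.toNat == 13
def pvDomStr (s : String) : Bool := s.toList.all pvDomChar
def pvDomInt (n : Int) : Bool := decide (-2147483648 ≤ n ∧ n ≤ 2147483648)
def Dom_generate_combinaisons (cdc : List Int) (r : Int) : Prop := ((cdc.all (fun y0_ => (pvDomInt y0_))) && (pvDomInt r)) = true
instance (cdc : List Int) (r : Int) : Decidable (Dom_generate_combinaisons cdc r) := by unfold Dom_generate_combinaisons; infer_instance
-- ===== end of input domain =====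

-- B replaces A's recursion over suffix slices by a bottom-up DP table (one pass over the
-- elements, maintaining the combinations of every size k ≤ r of the processed suffix);
-- alternative decomposition, same return value.

-- ===== PORT A =====
-- fuel = cdc.length + 1 only guards the termination of A's recursion over slices; it is never hit.
def genAuxA : Nat → List Int → Int → List (List Int)
  | 0, _, _ => []
  | fuel+1, cdc, r =>
    if r = 0 then [[]]
    else if cdc.length = 0 then []
    else
      (PySem.List.pyRange 0 cdc.length 1).foldl
        (fun combinaisons i =>
          combinaisons ++
            (genAuxA fuel (PySem.List.slice cdc (some (i+1)) none) (r-1)).map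
              (fun comb => (PySem.List.pyGetD cdc i 0) :: comb))
        []

def generate_combinaisons (cdc : List Int) (r : Int) : List (List Int) :=
  genAuxA (cdc.length + 1) cdc r

-- ===== PORT B =====
-- Python's inner loop 'for k in range(r, 0, -1): table[k] = [[x]+c for c in table[k-1]] + table[k]'
-- updates each entry from the OLD previous entry, i.e. it is the pointwise pass bstepAux/bstep.
def bstepAux (x : Int) (prev : List (List Int)) : List (List (List Int)) → List (List (List Int))
  | [] => []
  | cur :: rest => ((prev.map (fun c => x :: c)) ++ cur) :: bstepAux x cur rest

def bstep (x : Int) : List (List (List Int)) → List (List (List Int))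
  | [] => []
  | t0 :: rest => t0 :: bstepAux x t0 rest

def generate_combinaisons_alt (cdc : List Int) (r : Int) : List (List Int) :=
  if r < 0 ∨ (cdc.length : Int) < r then []
  else
    (cdc.reverse.foldl (fun tb x => bstep x tb)
        ([([] : List Int)] :: List.replicate r.toNat [])).getD r.toNat []

-- ===== PRECONDITION & SPEC =====
def Spec_generate_combinaisons (cdc : List Int) (r : Int) (out : List (List Int)) : Prop := out = generate_combinaisons_alt cdc r
instance (cdc : List Int) (r : Int) (out : List (List Int)) : Decidable (Spec_generate_combinaisons cdc r out) := by unfold Spec_generate_combinaisons; infer_instance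

-- ===== CLAIM (what is proved, stated in full; the proofs are below) =====
def Claim_equal_generate_combinaisons : Prop := ∀ (cdc : List Int) (r : Int), Dom_generate_combinaisons cdc r → Spec_generate_combinaisons cdc r (generate_combinaisons cdc r)

-- ===== LEMMAS AND PROOFS =====

-- clean mathematical characterisation both ports are reduced to
def comb (cdc : List Int) (r : Int) : List (List Int) :=
  if r = 0 then [[]]
  else match cdc with
  | [] => []
  | x :: xs => (comb xs (r-1)).map (fun c => x :: c) ++ comb xs r

lemma comb_zero (cdc : List Int) : comb cdc 0 = [[]] := by
  rw [comb.eq_def]; simp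

lemma comb_nil (r : Int) (h : r ≠ 0) : comb [] r = [] := by
  rw [comb.eq_def, if_neg h]

lemma comb_cons (x : Int) (xs : List Int) (r : Int) (h : r ≠ 0) :
    comb (x :: xs) r = (comb xs (r-1)).map (fun c => x :: c) ++ comb xs r := by
  rw [comb.eq_def, if_neg h]

lemma comb_neg (cdc : List Int) (r : Int) (h : r < 0) : comb cdc r = [] := by
  induction cdc generalizing r with
  | nil => exact comb_nil r (by omega)
  | cons x xs ih =>
      rw [comb_cons x xs r (by omega), ih (r-1) (by omega), ih r h]
      simp

lemma comb_big (cdc : List Int) (r : Int) (h : (cdc.length : Int) < r) : comb cdc r = [] := by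
  induction cdc generalizing r with
  | nil => exact comb_nil r (by simp at h; omega)
  | cons x xs ih =>
      have hl : ((x :: xs).length : Int) = (xs.length : Int) + 1 := by
        push_cast [List.length_cons]; ring
      rw [comb_cons x xs r (by omega), ih (r-1) (by omega), ih r (by omega)]
      simp

lemma flat_comb (c : List Int) (r : Int) (h : r ≠ 0) :
    (List.range c.length).flatMap
        (fun i => (comb (c.drop (i+1)) (r-1)).map (fun t => c.getD i 0 :: t))
      = comb c r := by
  induction c with
  | nil => simp [comb_nil r h]
  | cons x xs ih =>
      rw [List.length_cons, List.range_succ_eq_map, List.flatMap_cons, List.flatMap_map]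
      rw [comb_cons x xs r h, ← ih]
      rfl

lemma genAuxA_eq_comb : ∀ (fuel : Nat) (cdc : List Int) (r : Int),
    cdc.length < fuel → genAuxA fuel cdc r = comb cdc r := by
  intro fuel
  induction fuel with
  | zero => intro cdc r h; omega
  | succ n ih =>
      intro cdc r h
      rw [genAuxA]
      by_cases hr : r = 0
      · simp [hr, comb_zero]
      · rw [if_neg hr]
        by_cases hc : cdc.length = 0
        · rw [if_pos hc]
          obtain rfl : cdc = [] := List.length_eq_zero_iff.mp hc
          rw [comb_nil r hr]
        · rw [if_neg hc]
          rw [PySem.List.foldl_append_eq_flatMap, List.nil_append,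
            PySem.List.pyRange_zero_natCast, List.flatMap_map]
          rw [← flat_comb cdc r hr]
          congr 1
          funext k
          have h1 : PySem.List.slice cdc (some ((k : Int) + 1)) none = cdc.drop (k+1) := by
            rw [show ((k : Int) + 1) = ((k + 1 : Nat) : Int) from by push_cast; ring,
              PySem.List.slice_from_natCast]
          have h2 : PySem.List.pyGetD cdc (k : Int) 0 = cdc.getD k 0 := by
            rw [PySem.List.pyGetD_natCast]
          rw [h1, h2, ih _ _ (by
            have := List.length_drop (l := cdc) (i := k+1)
            omega)]

-- B side: the table after processing suffix s is [comb s 0, comb s 1, …, comb s m]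
lemma bstepAux_spec (x : Int) (s : List Int) : ∀ (m j : Nat),
    bstepAux x (comb s (j : Int))
        ((List.range' (j+1) m).map (fun k : Nat => comb s (k : Int)))
      = (List.range' (j+1) m).map (fun k : Nat => comb (x :: s) (k : Int)) := by
  intro m
  induction m with
  | zero => intro j; simp [bstepAux]
  | succ n ih =>
      intro j
      rw [List.range'_succ, List.map_cons, List.map_cons, bstepAux]
      have hc : ((j+1 : Nat) : Int) - 1 = (j : Int) := by push_cast; ring
      congr 1
      · rw [comb_cons x s ((j+1 : Nat) : Int) (by exact_mod_cast Nat.succ_ne_zero j), hc]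
      · have := ih (j+1)
        simpa using this

lemma bstep_spec (x : Int) (s : List Int) (m : Nat) :
    bstep x ((List.range (m+1)).map (fun k : Nat => comb s (k : Int)))
      = (List.range (m+1)).map (fun k : Nat => comb (x :: s) (k : Int)) := by
  rw [List.range_eq_range', List.range'_succ, List.map_cons, List.map_cons, bstep]
  congr 1
  · simp [comb_zero]
  · have h0 : comb s ((0 : Nat) : Int) = comb s 0 := by norm_num
    have := bstepAux_spec x s m 0
    simpa [comb_zero] using this

lemma fold_spec (m : Nat) (c : List Int) :
    c.reverse.foldl (fun tb x => bstep x tb)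
        ((List.range (m+1)).map (fun k : Nat => comb ([] : List Int) (k : Int)))
      = (List.range (m+1)).map (fun k : Nat => comb c (k : Int)) := by
  induction c with
  | nil => simp
  | cons y ys ih =>
      rw [List.reverse_cons, List.foldl_append, ih, List.foldl_cons, List.foldl_nil,
        bstep_spec]

lemma init_tbl (m : Nat) :
    ([([] : List Int)] :: List.replicate m ([] : List (List Int)))
      = (List.range (m+1)).map (fun k : Nat => comb ([] : List Int) (k : Int)) := by
  rw [List.range_succ_eq_map, List.map_cons, List.map_map]
  congr 1
  rw [show ((fun k : Nat => comb ([] : List Int) (k : Int)) ∘ Nat.succ)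
      = (fun _ : Nat => ([] : List (List Int))) from by
    funext k
    exact comb_nil _ (by exact_mod_cast Nat.succ_ne_zero k)]
  simp only [List.map_const', List.length_range]

lemma getD_tbl (m : Nat) (c : List Int) :
    ((List.range (m+1)).map (fun k : Nat => comb c (k : Int))).getD m [] = comb c (m : Int) := by
  rw [List.getD_eq_getElem?_getD, List.getElem?_map, List.getElem?_range (by omega)]
  rfl

-- ===== VERDICT (by name: the statement is the Claim_ definition above) =====
theorem generate_combinaisons_spec : Claim_equal_generate_combinaisons := by
  intro cdc r _
  unfold Spec_generate_combinaisons
  rw [generate_combinaisons, genAuxA_eq_comb _ _ _ (Nat.lt_succ_self _)]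
  unfold generate_combinaisons_alt
  by_cases hneg : r < 0 ∨ (cdc.length : Int) < r
  · rw [if_pos hneg]
    rcases hneg with hneg | hbig
    · exact comb_neg cdc r hneg
    · exact comb_big cdc r hbig
  · rw [if_neg hneg, init_tbl, fold_spec, getD_tbl,
      show ((r.toNat : Nat) : Int) = r from Int.toNat_of_nonneg (by omega)]
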